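-- pv_equiv track=rewrite | github.com/alexiosgkikas/DailyCoding | codesPython/coding369.py | start_letters
-- ===== SOURCE A (Python) =====
-- def start_letters(dictionary):
--     charset = dict()
--     for word in dictionary:
--         if word[0] not in charset:
--             charset[word[0]] = []
--         charset[word[0]].append(len(word))
--
--     possibly_start = []
--     for char in charset:
--         if all([len_word%2==0 for len_word in charset[char]]):
--             possibly_start.append(char)
--         #if you want based on possibility
--         # count = 0
--         # for len_word in charset[char]:
--         #     if int(len_word%2) == 0 :
--         #         count+=1
--         #     possibly_start.append((char,count/len(charset[char])))
--
--     return possibly_start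
-- ===== SOURCE B (Python) =====
-- def start_letters(dictionary):
--     # One pass: keep a single boolean per start letter instead of a list of lengths.
--     flags = {}
--     for word in dictionary:
--         ch = word[0]
--         flags[ch] = flags.get(ch, True) and len(word) % 2 == 0
--     return [ch for ch, ok in flags.items() if ok]
-- ===== Notes on version B (the rewrite author's own statement) =====
-- stated objective: simpler
-- what changed: B fuses A's two passes into one pass over the dictionary, maintaining a single boolean 'all lengths even so far' per start letter instead of accumulating a list of word lengths per letter and scanning those lists in a second pass.
import Mathlib
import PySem

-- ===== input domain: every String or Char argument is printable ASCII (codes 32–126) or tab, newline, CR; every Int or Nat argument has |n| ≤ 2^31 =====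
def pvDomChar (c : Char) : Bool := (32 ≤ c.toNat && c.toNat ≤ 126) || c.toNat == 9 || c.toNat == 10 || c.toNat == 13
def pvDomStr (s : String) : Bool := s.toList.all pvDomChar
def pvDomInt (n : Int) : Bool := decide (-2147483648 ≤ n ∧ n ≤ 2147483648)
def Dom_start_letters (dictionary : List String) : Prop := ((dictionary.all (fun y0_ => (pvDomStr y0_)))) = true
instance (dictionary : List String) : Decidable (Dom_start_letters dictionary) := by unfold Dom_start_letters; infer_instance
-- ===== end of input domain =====

-- B fuses A's two passes into one, keeping a boolean per start letter instead of a list of lengths (objective: simpler).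

-- ===== PORT A =====
-- one loop step: if word[0] not in charset: charset[word[0]] = []; charset[word[0]].append(len(word))
def startLettersStepA (d : PySem.Dict Char (List Int)) (word : String) : PySem.Dict Char (List Int) :=
  match PySem.Str.pyGet? word 0 with
  | none => d     -- word[0] raises IndexError in Python; excluded by Pre_
  | some c =>
    let d1 := if d.contains c then d else d.insert c ([] : List Int)
    d1.insert c (d1.getD c [] ++ [PySem.Str.len word])

def start_letters (dictionary : List String) : List String :=
  let charset := dictionary.foldl startLettersStepA PySem.Dict.empty
  -- for char in charset: if all(len_word % 2 == 0 …): possibly_start.append(char)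
  charset.keys.foldl
    (fun acc c =>
      if ((charset.getD c []).map (fun n => PySem.Int.mod n 2 == 0)).all id
      then acc ++ [String.ofList [c]] else acc) []

-- ===== PORT B =====
-- one loop step: flags[ch] = flags.get(ch, True) and len(word) % 2 == 0
def startLettersStepB (d : PySem.Dict Char Bool) (word : String) : PySem.Dict Char Bool :=
  match PySem.Str.pyGet? word 0 with
  | none => d     -- word[0] raises IndexError in Python; excluded by Pre_
  | some c => d.insert c (d.getD c true && (PySem.Int.mod (PySem.Str.len word) 2 == 0))

def start_letters_alt (dictionary : List String) : List String :=
  let flags := dictionary.foldl startLettersStepB PySem.Dict.empty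
  -- [ch for ch, ok in flags.items() if ok]
  flags.items.foldl (fun acc kv => if kv.2 then acc ++ [String.ofList [kv.1]] else acc) []

-- ===== PRECONDITION & SPEC =====
-- Pre_ excludes dictionaries containing an empty word: there word[0] raises IndexError in A (and in B).
def Pre_start_letters (dictionary : List String) : Prop := ∀ w ∈ dictionary, w ≠ ""
instance (dictionary : List String) : Decidable (Pre_start_letters dictionary) := by unfold Pre_start_letters; infer_instance
def pvWitness_start_letters : List String := ["ab", "cd", "a", "abcd"]

def Spec_start_letters (dictionary : List String) (out : List String) : Prop := out = start_letters_alt dictionary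
instance (dictionary : List String) (out : List String) : Decidable (Spec_start_letters dictionary out) := by unfold Spec_start_letters; infer_instance

-- ===== CLAIM (what is proved, stated in full; the proofs are below) =====
def Claim_equal_start_letters : Prop := ∀ (dictionary : List String), Dom_start_letters dictionary → Pre_start_letters dictionary → Spec_start_letters dictionary (start_letters dictionary)

-- ===== LEMMAS AND PROOFS =====

-- the abstraction B maintains: a length-list collapses to "all lengths even"
def slEven (ls : List Int) : Bool := (ls.map (fun n => PySem.Int.mod n 2 == 0)).all id
def slF (kv : Char × List Int) : Char × Bool := (kv.1, slEven kv.2)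

theorem slEven_append (ls : List Int) (n : Int) :
    slEven (ls ++ [n]) = (slEven ls && (PySem.Int.mod n 2 == 0)) := by
  simp [slEven]

theorem sl_contains (l : List (Char × List Int)) (c : Char) :
    (PySem.Dict.mk (l.map slF)).contains c = (PySem.Dict.mk l).contains c := by
  simp [PySem.Dict.contains, List.any_map, Function.comp_def, slF]

theorem sl_get? (l : List (Char × List Int)) (c : Char) :
    (PySem.Dict.mk (l.map slF)).get? c = ((PySem.Dict.mk l).get? c).map slEven := by
  simp [PySem.Dict.get?, List.find?_map, Function.comp_def, slF]

-- B's running boolean tracks "all lengths so far even" of A's running list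
theorem sl_val (l : List (Char × List Int)) (c : Char) (n : Int) :
    ((PySem.Dict.mk (l.map slF)).getD c true && (PySem.Int.mod n 2 == 0))
      = slEven ((PySem.Dict.mk l).getD c [] ++ [n]) := by
  rw [slEven_append, PySem.Dict.getD, PySem.Dict.getD, sl_get?]
  cases (PySem.Dict.mk l).get? c with
  | none => simp [slEven]
  | some ls => simp

-- a key-c overwrite skips a list that has no key c
theorem sl_overwrite_absent {ν : Type} (l : List (Char × ν)) (c : Char) (v : ν)
    (h : l.find? (fun p => p.1 == c) = none) :
    l.map (fun p => if (p.1 == c) = true then (c, v) else p) = l := by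
  rw [List.find?_eq_none] at h
  calc l.map (fun p => if (p.1 == c) = true then (c, v) else p)
      = l.map id := List.map_congr_left (fun p hp => by simp [h p hp])
    _ = l := List.map_id l

-- one loop iteration preserves the items-level simulation
theorem sl_step (l : List (Char × List Int)) (w : String) :
    startLettersStepB (PySem.Dict.mk (l.map slF)) w
      = PySem.Dict.mk ((startLettersStepA (PySem.Dict.mk l) w).items.map slF) := by
  unfold startLettersStepA startLettersStepB
  cases hg : PySem.Str.pyGet? w 0 with
  | none => simp
  | some c =>
    simp only []
    by_cases hc : (PySem.Dict.mk l).contains c = true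
    · -- key already present: both sides overwrite in place
      rw [if_pos hc]
      have hcB : (PySem.Dict.mk (l.map slF)).contains c = true := by rw [sl_contains]; exact hc
      simp only [PySem.Dict.insert, hc, hcB, if_pos]
      congr 1
      rw [List.map_map, List.map_map]
      apply List.map_congr_left
      intro p _
      by_cases h : (p.1 == c) = true
      · simp only [Function.comp_apply, slF, h, if_pos]
        rw [sl_val l c (PySem.Str.len w)]
      · simp only [Function.comp_apply, slF, h, if_neg, Bool.false_eq_true, not_false_iff]
    · -- key absent: A appends [] then overwrites it; B appends the fused boolean
      have hcF : (PySem.Dict.mk l).contains c = false := by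
        exact Bool.not_eq_true _ |>.mp hc
      have hfind : l.find? (fun p => p.1 == c) = none := by
        rw [List.find?_eq_none]
        intro p hp hbeq
        exact hc (by simp only [PySem.Dict.contains, List.any_eq_true]; exact ⟨p, hp, hbeq⟩)
      have hcB : (PySem.Dict.mk (l.map slF)).contains c = false := by
        rw [sl_contains]; exact hcF
      have hd1 : (if (PySem.Dict.mk l).contains c = true
            then PySem.Dict.mk l else (PySem.Dict.mk l).insert c ([] : List Int))
          = PySem.Dict.mk (l ++ [(c, [])]) := by
        rw [if_neg hc]
        simp only [PySem.Dict.insert, hcF, Bool.false_eq_true, if_false]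
      rw [hd1]
      have hc1 : (PySem.Dict.mk (l ++ [(c, ([] : List Int))])).contains c = true := by
        simp [PySem.Dict.contains]
      have hget1 : (PySem.Dict.mk (l ++ [(c, ([] : List Int))])).getD c [] = [] := by
        simp [PySem.Dict.getD, PySem.Dict.get?, List.find?_append, hfind]
      have hgetB : (PySem.Dict.mk (l.map slF)).getD c true = true := by
        have hfindB : (l.map slF).find? (fun p => p.1 == c) = none := by
          rw [List.find?_map]
          rw [show ((fun p => p.1 == c) ∘ slF : Char × List Int → Bool)
                = (fun p => p.1 == c) from rfl, hfind]
          rfl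
        simp [PySem.Dict.getD, PySem.Dict.get?, hfindB]
      simp only [PySem.Dict.insert, hcB, hc1, if_pos, Bool.false_eq_true, if_false]
      congr 1
      rw [hget1, hgetB, List.map_append, sl_overwrite_absent l c _ hfind, List.map_append]
      simp [slF, slEven]

-- the simulation holds after the whole fold
theorem sl_fold (ws : List String) :
    ∀ (l : List (Char × List Int)),
      ws.foldl startLettersStepB (PySem.Dict.mk (l.map slF))
        = PySem.Dict.mk ((ws.foldl startLettersStepA (PySem.Dict.mk l)).items.map slF) := by
  induction ws with
  | nil => intro l; simp
  | cons w ws ih =>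
    intro l
    simp only [List.foldl_cons]
    rw [sl_step]
    have h := ih ((startLettersStepA (PySem.Dict.mk l) w).items)
    simpa using h

-- keys stay duplicate-free through A's loop
theorem sl_nodup (ws : List String) :
    ∀ (d : PySem.Dict Char (List Int)), d.keys.Nodup →
      (ws.foldl startLettersStepA d).keys.Nodup := by
  induction ws with
  | nil => intro d h; simpa using h
  | cons w ws ih =>
    intro d h
    apply ih
    unfold startLettersStepA
    cases PySem.Str.pyGet? w 0 with
    | none => simpa using h
    | some c =>
      simp only []
      by_cases hc : d.contains c
      · rw [if_pos hc]
        exact PySem.Dict.nodup_keys_insert _ _ _ h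
      · rw [if_neg hc]
        exact PySem.Dict.nodup_keys_insert _ _ _ (PySem.Dict.nodup_keys_insert _ _ _ h)

theorem start_letters_spec_aux (dictionary : List String) :
    start_letters dictionary = start_letters_alt dictionary := by
  have hA : start_letters dictionary
      = (dictionary.foldl startLettersStepA PySem.Dict.empty).keys.foldl
          (fun acc c =>
            if (((dictionary.foldl startLettersStepA PySem.Dict.empty).getD c []).map
                  (fun n => PySem.Int.mod n 2 == 0)).all id
            then acc ++ [String.ofList [c]] else acc) [] := rfl
  have hB : start_letters_alt dictionary
      = (dictionary.foldl startLettersStepB PySem.Dict.empty).items.foldl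
          (fun acc kv => if kv.2 then acc ++ [String.ofList [kv.1]] else acc) [] := rfl
  rw [hA, hB]
  have hsim : dictionary.foldl startLettersStepB PySem.Dict.empty
      = PySem.Dict.mk ((dictionary.foldl startLettersStepA PySem.Dict.empty).items.map slF) := by
    have h := sl_fold dictionary []
    simpa [PySem.Dict.empty] using h
  rw [hsim]
  set dA := dictionary.foldl startLettersStepA PySem.Dict.empty with hdA
  have hnd : dA.keys.Nodup := by
    have h := sl_nodup dictionary PySem.Dict.empty (by simp [PySem.Dict.empty, PySem.Dict.keys])
    simpa [hdA] using h
  -- B's fold over the mapped items = a fold over A's keys (keys are duplicate-free)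
  rw [show (PySem.Dict.mk (dA.items.map slF)).items = dA.items.map slF from rfl, List.foldl_map]
  rw [show dA.items = dA.keys.map (fun k => (k, dA.getD k [])) from
        PySem.Dict.items_eq_map_keys dA hnd [], List.foldl_map]
  rfl

-- ===== VERDICT (by name: the statement is the Claim_ definition above) =====
theorem start_letters_spec : Claim_equal_start_letters := by
  intro dictionary _ _
  unfold Spec_start_letters
  exact start_letters_spec_aux dictionary
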